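-- pv_equiv track=rewrite | github.com/yz-joey/yz-joey.github.io | files/f-w4-ws-sol.py | everyOtherHelper
-- ===== SOURCE A (Python) =====
-- def everyOtherHelper(l, isSkipped):
-- 	if l == []:
-- 		return []
-- 	else:
-- 		head = l[0]
-- 		tail = l[1:]
-- 		if isSkipped:
-- 			return everyOtherHelper(tail, not isSkipped) # not isSkipped == False
-- 		else:
-- 			return [head] + everyOtherHelper(tail, not isSkipped) # not isSkipped == True
-- ===== SOURCE B (Python) =====
-- def everyOtherHelper(l, isSkipped):
-- 	result = []
-- 	while l != []:
-- 		head = l[0]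
-- 		if not isSkipped:
-- 			result.append(head)
-- 		l = l[1:]
-- 		isSkipped = not isSkipped
-- 	return result
-- ===== Notes on version B (the rewrite author's own statement) =====
-- stated objective: alternative
-- what changed: Replaced the non-tail recursion that rebuilds the result with repeated list concatenation by a single iterative while-loop maintaining an accumulator list (append in place) and a toggle flag.
import Mathlib
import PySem

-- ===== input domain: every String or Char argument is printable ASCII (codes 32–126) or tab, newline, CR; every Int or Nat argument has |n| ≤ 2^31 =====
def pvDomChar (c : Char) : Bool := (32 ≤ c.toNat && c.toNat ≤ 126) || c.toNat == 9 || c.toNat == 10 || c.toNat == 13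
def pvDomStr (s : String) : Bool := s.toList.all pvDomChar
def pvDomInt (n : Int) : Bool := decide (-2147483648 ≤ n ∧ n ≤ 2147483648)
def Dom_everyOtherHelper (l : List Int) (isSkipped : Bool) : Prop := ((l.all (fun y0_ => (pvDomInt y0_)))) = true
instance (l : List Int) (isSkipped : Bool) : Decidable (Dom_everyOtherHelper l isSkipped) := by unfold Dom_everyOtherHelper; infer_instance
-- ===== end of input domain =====

-- ===== PORT A =====
-- Recursion on the list, as in A: drop the head when isSkipped, else cons it.
def everyOtherHelper (l : List Int) (isSkipped : Bool) : List Int :=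
  match l with
  | [] => []
  | head :: tail =>
    if isSkipped then everyOtherHelper tail (!isSkipped)
    else [head] ++ everyOtherHelper tail (!isSkipped)

-- ===== PORT B =====
-- B: iterative while-loop with an accumulator (result.append = result ++ [head]) and a toggle.
def everyOtherHelperLoop (l : List Int) (isSkipped : Bool) (result : List Int) : List Int :=
  match l with
  | [] => result
  | head :: rest =>
    everyOtherHelperLoop rest (!isSkipped) (if !isSkipped then result ++ [head] else result)

def everyOtherHelper_alt (l : List Int) (isSkipped : Bool) : List Int :=
  everyOtherHelperLoop l isSkipped []

-- ===== PRECONDITION & SPEC =====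
def Spec_everyOtherHelper (l : List Int) (isSkipped : Bool) (out : List Int) : Prop := out = everyOtherHelper_alt l isSkipped
instance (l : List Int) (isSkipped : Bool) (out : List Int) : Decidable (Spec_everyOtherHelper l isSkipped out) := by unfold Spec_everyOtherHelper; infer_instance

-- ===== CLAIM (what is proved, stated in full; the proofs are below) =====
def Claim_equal_everyOtherHelper : Prop := ∀ (l : List Int) (isSkipped : Bool), Dom_everyOtherHelper l isSkipped → Spec_everyOtherHelper l isSkipped (everyOtherHelper l isSkipped)

-- ===== LEMMAS AND PROOFS =====

lemma everyOtherHelperLoop_acc (l : List Int) (s : Bool) (acc : List Int) :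
    everyOtherHelperLoop l s acc = acc ++ everyOtherHelper l s := by
  induction l generalizing s acc with
  | nil => simp [everyOtherHelperLoop, everyOtherHelper]
  | cons h t ih =>
    cases s <;> simp [everyOtherHelperLoop, everyOtherHelper, ih]

-- ===== VERDICT (by name: the statement is the Claim_ definition above) =====
theorem everyOtherHelper_spec : Claim_equal_everyOtherHelper := by
  intro l s _
  unfold Spec_everyOtherHelper everyOtherHelper_alt
  simp [everyOtherHelperLoop_acc]
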